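-- pv_equiv track=rewrite | github.com/Zim95/hackerrank_solutions | algorithms/implementation/easy/migratory_birds.py | migratoryBirds
-- ===== SOURCE A (Python) =====
-- def migratoryBirds(arr):
--     bird_count = {}
--     for bird in arr:
--         if bird in bird_count:
--             bird_count[bird] += 1
--         else:
--             bird_count[bird] = 1
--
--     max_frequency = 0
--     max_frequency_list = []
--
--     for bird, bird_freq in bird_count.items():
--         if max_frequency == 0:
--             max_frequency = bird_freq
--             max_frequency_list.append(bird)
--             continue
--
--         if bird_freq == max_frequency:
--             max_frequency_list.append(bird)
--             continue
--
--         if bird_freq > max_frequency: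
--             max_frequency = bird_freq
--             max_frequency_list = [bird]
--
--     return min(max_frequency_list)
-- ===== SOURCE B (Python) =====
-- def migratoryBirds(arr):
--     s = sorted(arr)
--     best = 0
--     run = 0
--     prev = None
--     ans = None
--     for b in s:
--         run = run + 1 if b == prev else 1
--         prev = b
--         if run > best:
--             best = run
--             ans = b
--     return ans
-- ===== Notes on version B (the rewrite author's own statement) =====
-- stated objective: alternative
-- what changed: Replaces A's hash-count dict plus running-max-with-tie-list passes by sort-then-scan: sort the array and make one pass over the sorted list tracking the current run length, taking the first (hence lowest-id) run that strictly beats the best so far; no dictionary at all.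
import Mathlib
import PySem

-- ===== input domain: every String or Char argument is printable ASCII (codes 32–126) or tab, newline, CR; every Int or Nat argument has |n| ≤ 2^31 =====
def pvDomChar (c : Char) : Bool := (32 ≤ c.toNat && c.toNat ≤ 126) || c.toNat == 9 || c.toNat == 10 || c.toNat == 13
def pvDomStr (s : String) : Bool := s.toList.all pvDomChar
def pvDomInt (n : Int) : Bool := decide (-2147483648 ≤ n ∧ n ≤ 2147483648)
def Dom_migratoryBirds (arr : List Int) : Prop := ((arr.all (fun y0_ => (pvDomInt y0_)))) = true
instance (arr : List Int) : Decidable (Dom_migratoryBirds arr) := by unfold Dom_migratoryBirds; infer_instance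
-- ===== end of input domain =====

-- B replaces A's hash-count dict plus running-max/tie-list passes by sort-then-scan:
-- one pass over the sorted list tracking the current run length, keeping the first run
-- that strictly beats the best so far (alternative algorithm, no dictionary).

-- ===== PORT A =====
-- one step of A's second loop: state = (max_frequency, max_frequency_list), p = (bird, bird_freq)
def pvStepA (s : Int × List Int) (p : Int × Int) : Int × List Int :=
  if s.1 = 0 then (p.2, s.2 ++ [p.1])
  else if p.2 = s.1 then (s.1, s.2 ++ [p.1])
  else if p.2 > s.1 then (p.2, [p.1])
  else s

def migratoryBirds (arr : List Int) : Int :=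
  let bird_count := arr.foldl
    (fun d bird => if d.contains bird then d.modify bird 0 (· + 1) else d.insert bird 1)
    (PySem.Dict.empty : PySem.Dict Int Int)
  let st := bird_count.items.foldl pvStepA ((0 : Int), ([] : List Int))
  (PySem.List.min? st.2 (fun x => x)).getD 0   -- min([]) raises ValueError: excluded by Pre_

-- ===== PORT B =====
-- one step of B's loop over the sorted list: state = (prev, run, best, ans)
def pvStepB (st : Option Int × Int × Int × Option Int) (b : Int) : Option Int × Int × Int × Option Int :=
  let run := if st.1 = some b then st.2.1 + 1 else 1
  if run > st.2.2.1 then (some b, run, run, some b)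
  else (some b, run, st.2.2.1, st.2.2.2)

def migratoryBirds_alt (arr : List Int) : Int :=
  let s := PySem.List.sorted arr (fun x => x) false
  let st := s.foldl pvStepB ((none : Option Int), (0 : Int), (0 : Int), (none : Option Int))
  st.2.2.2.getD 0   -- Python B returns None on empty arr: excluded by Pre_

-- ===== PRECONDITION & SPEC =====
-- On the empty list A raises ValueError (min of an empty sequence) and B returns None.
def Pre_migratoryBirds (arr : List Int) : Prop := arr ≠ []
instance (arr : List Int) : Decidable (Pre_migratoryBirds arr) := by
  unfold Pre_migratoryBirds; infer_instance
def pvWitness_migratoryBirds : List Int := [1, 4, 4, 2]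

def Spec_migratoryBirds (arr : List Int) (out : Int) : Prop := out = migratoryBirds_alt arr
instance (arr : List Int) (out : Int) : Decidable (Spec_migratoryBirds arr out) := by
  unfold Spec_migratoryBirds; infer_instance

-- ===== CLAIM (what is proved, stated in full; the proofs are below) =====
def Claim_equal_migratoryBirds : Prop := ∀ (arr : List Int), Dom_migratoryBirds arr → Pre_migratoryBirds arr → Spec_migratoryBirds arr (migratoryBirds arr)

-- ===== LEMMAS AND PROOFS =====

-- A's counting step is exactly Counter's step
lemma pvCountStep (d : PySem.Dict Int Int) (b : Int) :
    (if d.contains b then d.modify b 0 (· + 1) else d.insert b 1) = d.modify b 0 (· + 1) := by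
  unfold PySem.Dict.modify
  split <;> simp_all [PySem.Dict.getD_of_not_contains]

-- max of the second components, A's running maximum
def pvMaxV (l : List (Int × Int)) : Int := (l.map (·.2)).foldl max 0

lemma pvMaxV_append (l : List (Int × Int)) (p : Int × Int) :
    pvMaxV (l ++ [p]) = max (pvMaxV l) p.2 := by
  simp [pvMaxV, List.foldl_append]

lemma pvMaxV_pos (l : List (Int × Int)) (hpos : ∀ p ∈ l, 0 < p.2) (hne : l ≠ []) :
    0 < pvMaxV l := by
  obtain ⟨p, t, rfl⟩ := List.exists_cons_of_ne_nil hne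
  have h1 : 0 < p.2 := hpos p (by simp)
  have h2 : p.2 ≤ pvMaxV (p :: t) := by
    have := (PySem.List.le_foldl_max ((p :: t).map (·.2)) 0).2
    exact this p.2 (by simp)
  omega

-- characterisation of A's second loop: it computes the running max of the frequencies
-- together with the (in-order) list of birds attaining it
lemma pvLoopA_eq (l : List (Int × Int)) (hpos : ∀ p ∈ l, 0 < p.2) :
    l.foldl pvStepA ((0 : Int), ([] : List Int)) =
      (pvMaxV l, (l.filter (fun p => p.2 = pvMaxV l)).map (·.1)) := by
  induction l using List.reverseRecOn with
  | nil => simp [pvMaxV]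
  | append_singleton l p ih =>
    have hposl : ∀ q ∈ l, 0 < q.2 := fun q hq => hpos q (by simp [hq])
    have hp : 0 < p.2 := hpos p (by simp)
    rw [List.foldl_append, ih hposl, pvMaxV_append]
    rcases eq_or_ne l [] with rfl | hne
    · simp only [List.nil_append, List.foldl_cons, List.foldl_nil, pvStepA, pvMaxV,
        List.map_nil]
      have hmax : max 0 p.2 = p.2 := by omega
      simp [hmax]
    · have hMpos := pvMaxV_pos l hposl hne
      have hbound : ∀ q ∈ l, q.2 ≤ pvMaxV l := by
        intro q hq
        have := (PySem.List.le_foldl_max (l.map (·.2)) 0).2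
        exact this q.2 (List.mem_map_of_mem hq)
      rcases lt_trichotomy p.2 (pvMaxV l) with hlt | heq | hgt
      · have hmax : max (pvMaxV l) p.2 = pvMaxV l := by omega
        simp only [List.foldl_cons, List.foldl_nil, pvStepA, hmax]
        rw [if_neg (by omega), if_neg (by omega), if_neg (by omega)]
        simp only [List.filter_append, List.filter_cons, List.filter_nil]
        rw [if_neg (by simp; omega)]
        simp
      · have hmax : max (pvMaxV l) p.2 = pvMaxV l := by omega
        simp only [List.foldl_cons, List.foldl_nil, pvStepA, hmax]
        rw [if_neg (by omega), if_pos (by omega)]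
        simp only [List.filter_append, List.filter_cons, List.filter_nil]
        rw [if_pos (by simp [heq])]
        simp
      · have hmax : max (pvMaxV l) p.2 = p.2 := by omega
        have hnil : l.filter (fun q => decide (q.2 = p.2)) = [] := by
          rw [List.filter_eq_nil_iff]
          intro q hq
          have := hbound q hq
          simp only [decide_eq_true_eq]
          omega
        simp only [List.foldl_cons, List.foldl_nil, pvStepA, hmax]
        rw [if_neg (by omega), if_neg (by omega), if_pos (by omega)]
        simp only [List.filter_append, List.filter_cons, List.filter_nil, hnil]
        rw [if_pos (by simp)]
        simp

-- the largest multiplicity occurring in s (0 for the empty list)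
def pvMC (s : List Int) : Int := (s.map (fun v => (s.count v : Int))).foldl max 0

lemma pvFoldMaxMax (l : List Int) (a : Int) : ∀ b, l.foldl max (max a b) = max a (l.foldl max b) := by
  induction l with
  | nil => intro b; simp
  | cons x t ih =>
    intro b
    simp only [List.foldl_cons, max_assoc, ih]

lemma pvFoldMaxReplicate (n : Nat) (x c : Int) :
    (List.replicate n x).foldl max c = if n = 0 then c else max c x := by
  induction n generalizing c with
  | zero => simp
  | succ m ih =>
    simp only [List.replicate_succ, List.foldl_cons, ih]
    rcases Nat.eq_zero_or_pos m with rfl | hm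
    · simp
    · rw [if_neg (by omega), if_neg (by omega), max_assoc, max_self]

-- folding B's step over a run of equal elements already entered (prev = a, run ≤ best)
lemma pvRunFold (a : Int) (k : Nat) : ∀ (r best : Int) (ans : Option Int), r ≤ best →
    (List.replicate k a).foldl pvStepB (some a, r, best, ans) =
      (some a, r + k, max best (r + k), if best < r + k then some a else ans) := by
  induction k with
  | zero =>
    intro r best ans h
    simp only [List.replicate_zero, List.foldl_nil, Nat.cast_zero, add_zero]
    rw [max_eq_left h, if_neg (by omega)]
  | succ m ih =>
    intro r best ans h
    have hstep : pvStepB (some a, r, best, ans) a =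
        if r + 1 > best then (some a, r + 1, r + 1, some a) else (some a, r + 1, best, ans) := by
      simp [pvStepB]
    rw [List.replicate_succ, List.foldl_cons, hstep]
    by_cases hb : r + 1 > best
    · rw [if_pos hb, ih (r + 1) (r + 1) (some a) le_rfl]
      push_cast
      simp only [Prod.mk.injEq]
      refine ⟨trivial, by omega, by omega, ?_⟩
      split_ifs <;> first | rfl | omega
    · rw [if_neg hb, ih (r + 1) best ans (by omega)]
      push_cast
      simp only [Prod.mk.injEq]
      refine ⟨trivial, by omega, by omega, ?_⟩
      split_ifs <;> first | rfl | omega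

-- folding B's step over a fresh maximal run (prev ≠ a)
lemma pvGroupFold (a : Int) (k : Nat) (prev : Option Int) (r best : Int) (ans : Option Int)
    (hk : 1 ≤ k) (hprev : prev ≠ some a) (hbest : 0 ≤ best) :
    (List.replicate k a).foldl pvStepB (prev, r, best, ans) =
      (some a, (k : Int), max best k, if best < k then some a else ans) := by
  obtain ⟨m, rfl⟩ : ∃ m, k = m + 1 := ⟨k - 1, by omega⟩
  have hstep : pvStepB (prev, r, best, ans) a =
      if (1 : Int) > best then (some a, 1, 1, some a) else (some a, 1, best, ans) := by
    simp [pvStepB, hprev]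
  rw [List.replicate_succ, List.foldl_cons, hstep]
  by_cases hb : (1 : Int) > best
  · rw [if_pos hb, pvRunFold a m 1 1 (some a) le_rfl]
    push_cast
    simp only [Prod.mk.injEq]
    refine ⟨trivial, by omega, by omega, ?_⟩
    split_ifs <;> first | rfl | omega
  · rw [if_neg hb, pvRunFold a m 1 best ans (by omega)]
    push_cast
    simp only [Prod.mk.injEq]
    refine ⟨trivial, by omega, by omega, ?_⟩
    split_ifs <;> first | rfl | omega

lemma pvMC_nonneg (s : List Int) : 0 ≤ pvMC s :=
  (PySem.List.le_foldl_max (s.map (fun v => (s.count v : Int))) 0).1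

lemma pvMC_bound (s : List Int) (v : Int) (hv : v ∈ s) : (s.count v : Int) ≤ pvMC s :=
  (PySem.List.le_foldl_max (s.map (fun v => (s.count v : Int))) 0).2 _
    (List.mem_map_of_mem hv)

-- a sorted list splits into its (maximal) leading run and a strictly larger remainder
lemma pvDecomp (a : Int) (rest : List Int) (hs : (a :: rest).Pairwise (· ≤ ·)) :
    ∃ (k : Nat) (t : List Int),
      a :: rest = List.replicate k a ++ t ∧ 1 ≤ k ∧ a ∉ t ∧
      t.Pairwise (· ≤ ·) ∧ (∀ x ∈ t, a < x) := by
  have hlt : ∀ x ∈ (a :: rest).dropWhile (· == a), a < x := by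
    intro x hx
    have hsub : List.Sublist ((a :: rest).dropWhile (· == a)) (a :: rest) :=
      List.dropWhile_sublist _
    have hle : ∀ y ∈ (a :: rest).dropWhile (· == a), a ≤ y := by
      intro y hy
      rcases List.mem_cons.mp (hsub.subset hy) with rfl | hyr
      · exact le_refl y
      · exact List.rel_of_pairwise_cons hs hyr
    have hne : (a :: rest).dropWhile (· == a) ≠ [] := List.ne_nil_of_mem hx
    obtain ⟨h, t', hT⟩ := List.exists_cons_of_ne_nil hne
    have h2 := List.head_dropWhile_not (· == a) hne
    have h3 : ((a :: rest).dropWhile (· == a)).head hne = h := by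
      simp only [hT, List.head_cons]
    rw [h3] at h2
    have hha : h ≠ a := by simpa using h2
    have hah : a < h := lt_of_le_of_ne (hle h (by rw [hT]; simp)) (Ne.symm hha)
    have hpt : ((a :: rest).dropWhile (· == a)).Pairwise (· ≤ ·) :=
      hs.sublist (List.dropWhile_sublist _)
    rw [hT] at hpt hx
    rcases List.mem_cons.mp hx with rfl | hx'
    · exact hah
    · exact lt_of_lt_of_le hah (List.rel_of_pairwise_cons hpt hx')
  refine ⟨((a :: rest).takeWhile (· == a)).length, (a :: rest).dropWhile (· == a),
    ?_, ?_, fun ha => lt_irrefl a (hlt a ha),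
    hs.sublist (List.dropWhile_sublist _), hlt⟩
  · rw [show List.replicate ((a :: rest).takeWhile (· == a)).length a
        = (a :: rest).takeWhile (· == a) from ?_]
    · exact (List.takeWhile_append_dropWhile).symm
    · symm
      rw [List.eq_replicate_iff]
      exact ⟨rfl, fun b hb => by simpa using List.mem_takeWhile_imp hb⟩
  · rw [List.takeWhile_cons_of_pos (by simp)]
    simp

lemma pvCount_decomp_self (a : Int) (k : Nat) (t : List Int) (hnot : a ∉ t) :
    (List.replicate k a ++ t).count a = k := by
  simp [List.count_append, List.count_eq_zero_of_not_mem hnot]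

lemma pvCount_decomp_mem (a : Int) (k : Nat) (t : List Int) (hnot : a ∉ t) (v : Int)
    (hv : v ∈ t) : (List.replicate k a ++ t).count v = t.count v := by
  have hva : a ≠ v := fun h => hnot (h ▸ hv)
  simp only [List.count_append, List.count_replicate]
  rw [if_neg (by simpa using hva), Nat.zero_add]

lemma pvMC_decomp (a : Int) (k : Nat) (t : List Int) (hk : 1 ≤ k) (hnot : a ∉ t) :
    pvMC (List.replicate k a ++ t) = max (k : Int) (pvMC t) := by
  unfold pvMC
  rw [List.map_append, List.foldl_append]
  have h1 : (List.replicate k a).map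
      (fun v => (((List.replicate k a ++ t).count v : Nat) : Int)) =
      List.replicate k (k : Int) := by
    rw [List.map_replicate, pvCount_decomp_self a k t hnot]
  have h2 : t.map (fun v => (((List.replicate k a ++ t).count v : Nat) : Int)) =
      t.map (fun v => ((t.count v : Nat) : Int)) := by
    apply List.map_congr_left
    intro v hv
    rw [pvCount_decomp_mem a k t hnot v hv]
  rw [h1, h2, pvFoldMaxReplicate, if_neg (by omega),
    max_comm (0 : Int) (k : Int),
    pvFoldMaxMax (t.map (fun v => ((t.count v : Nat) : Int))) (k : Int) 0]

-- characterisation of B's scan over a sorted list: final best = max of old best and the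
-- largest multiplicity; ans = the least value attaining it if that beats best, else unchanged
lemma pvFoldB_char : ∀ (n : Nat) (s : List Int) (prev : Option Int) (r best : Int)
    (ans : Option Int), s.length ≤ n → s.Pairwise (· ≤ ·) → (∀ x ∈ s, prev ≠ some x) →
    0 ≤ best →
    (s.foldl pvStepB (prev, r, best, ans)).2.2.1 = max best (pvMC s) ∧
    (best < max best (pvMC s) → ∃ m, (s.foldl pvStepB (prev, r, best, ans)).2.2.2 = some m ∧
      m ∈ s ∧ ((s.count m : Int) = max best (pvMC s)) ∧
      ∀ v ∈ s, (s.count v : Int) = max best (pvMC s) → m ≤ v) ∧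
    (¬ best < max best (pvMC s) → (s.foldl pvStepB (prev, r, best, ans)).2.2.2 = ans) := by
  intro n
  induction n with
  | zero =>
    intro s prev r best ans hlen _ _ hbest
    have hnil : s = [] := List.eq_nil_of_length_eq_zero (by omega)
    subst hnil
    have hmc : pvMC ([] : List Int) = 0 := rfl
    rw [hmc, max_eq_left hbest]
    exact ⟨rfl, fun h => absurd h (by omega), fun _ => rfl⟩
  | succ n ih =>
    intro s prev r best ans hlen hs hprev hbest
    rcases s with _ | ⟨a, rest⟩
    · have hmc : pvMC ([] : List Int) = 0 := rfl
      rw [hmc, max_eq_left hbest]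
      exact ⟨rfl, fun h => absurd h (by omega), fun _ => rfl⟩
    · obtain ⟨k, t, hdec, hk, hnot, hts, hlt⟩ := pvDecomp a rest hs
      rw [hdec]
      have hprev' : prev ≠ some a := hprev a (by simp)
      have hlen' : t.length ≤ n := by
        have hL := congrArg List.length hdec
        rw [List.length_append, List.length_replicate] at hL
        simp only [List.length_cons] at hL hlen
        omega
      have hprev'' : ∀ x ∈ t, (some a : Option Int) ≠ some x := by
        intro x hx h
        exact absurd (Option.some.inj h) (ne_of_lt (hlt x hx))
      have hbest' : (0 : Int) ≤ max best (k : Int) := le_trans hbest (le_max_left _ _)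
      rw [List.foldl_append, pvGroupFold a k prev r best ans hk hprev' hbest]
      obtain ⟨ihb, ih2, ih3⟩ := ih t (some a) (k : Int) (max best (k : Int))
        (if best < (k : Int) then some a else ans) hlen' hts hprev'' hbest'
      rw [pvMC_decomp a k t hk hnot]
      have hMt0 : 0 ≤ pvMC t := pvMC_nonneg t
      have hamem : a ∈ List.replicate k a ++ t := by
        rw [List.mem_append, List.mem_replicate]
        exact Or.inl ⟨by omega, rfl⟩
      have hca : ((List.replicate k a ++ t).count a : Int) = (k : Int) := by
        rw [pvCount_decomp_self a k t hnot]
      refine ⟨by rw [ihb, max_assoc], ?_, ?_⟩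
      · -- the best is beaten: exhibit the least value of maximal multiplicity
        intro hbeat
        by_cases h1 : max best (k : Int) < pvMC t
        · -- the answer comes from the remainder t
          have hKle : (k : Int) ≤ max best (k : Int) := le_max_right _ _
          have hble : best ≤ max best (k : Int) := le_max_left _ _
          have hMsEq : max best (max (k : Int) (pvMC t)) = pvMC t := by
            rw [max_eq_right (le_of_lt (lt_of_le_of_lt hKle h1)),
              max_eq_right (le_of_lt (lt_of_le_of_lt hble h1))]
          have hIHmax : max (max best (k : Int)) (pvMC t) = pvMC t :=
            max_eq_right (le_of_lt h1)
          obtain ⟨m, hans, hmem, hmc, hmin⟩ := ih2 (by rw [hIHmax]; exact h1)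
          rw [hIHmax] at hmc hmin
          refine ⟨m, hans, List.mem_append_right _ hmem, ?_, ?_⟩
          · rw [hMsEq, pvCount_decomp_mem a k t hnot m hmem]
            exact hmc
          · intro v hv hcv
            rw [hMsEq] at hcv
            rcases List.mem_append.mp hv with hvr | hvt
            · exfalso
              have hva : v = a := (List.eq_of_mem_replicate hvr)
              rw [hva, hca] at hcv
              omega
            · rw [pvCount_decomp_mem a k t hnot v hvt] at hcv
              exact hmin v hvt hcv
        · -- the leading run already carries the (weak) maximum
          rw [not_lt] at h1
          have hIHmax : max (max best (k : Int)) (pvMC t) = max best (k : Int) :=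
            max_eq_left h1
          have hans1 := ih3 (by rw [hIHmax]; omega)
          by_cases hbk : best < (k : Int)
          · have hMsEq : max best (max (k : Int) (pvMC t)) = (k : Int) := by
              have h2 : max (k : Int) (pvMC t) = (k : Int) := by
                rcases max_choice best (k : Int) with h | h <;> rw [h] at h1
                · exact max_eq_left (by omega)
                · exact max_eq_left h1
              rw [h2, max_eq_right (le_of_lt hbk)]
            rw [hans1, if_pos hbk, hMsEq]
            refine ⟨a, rfl, hamem, by rw [hca], ?_⟩
            intro v hv _
            rcases List.mem_append.mp hv with hvr | hvt
            · rw [List.eq_of_mem_replicate hvr]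
            · exact le_of_lt (hlt v hvt)
          · exfalso
            rw [not_lt] at hbk
            have h2 : max best (max (k : Int) (pvMC t)) = best := by
              have hkb : max (k : Int) (pvMC t) ≤ best := by
                rcases max_choice best (k : Int) with h | h <;> rw [h] at h1
                · exact max_le hbk h1
                · exact max_le hbk (le_trans h1 hbk)
              exact max_eq_left hkb
            rw [h2] at hbeat
            omega
      · -- the best survives: ans is untouched
        intro hkeep
        have hble : best ≤ max best (max (k : Int) (pvMC t)) := le_max_left _ _
        have heq : max best (max (k : Int) (pvMC t)) = best := by omega
        have hkle : (k : Int) ≤ best := by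
          have := le_max_left (k : Int) (pvMC t)
          have h2 := le_max_right best (max (k : Int) (pvMC t))
          omega
        have htle : pvMC t ≤ best := by
          have := le_max_right (k : Int) (pvMC t)
          have h2 := le_max_right best (max (k : Int) (pvMC t))
          omega
        have hIHmax : max (max best (k : Int)) (pvMC t) = max best (k : Int) :=
          max_eq_left (le_trans htle (le_max_left _ _))
        rw [ih3 (by rw [hIHmax]; omega), if_neg (by omega)]

-- ===== VERDICT (by name: the statement is the Claim_ definition above) =====
theorem migratoryBirds_spec : Claim_equal_migratoryBirds := by
  intro arr _ hpre
  unfold Spec_migratoryBirds migratoryBirds migratoryBirds_alt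
  -- A's counting loop builds Counter(arr)
  have hA : arr.foldl
      (fun d bird => if d.contains bird then d.modify bird 0 (· + 1) else d.insert bird 1)
      PySem.Dict.empty = PySem.Dict.counter arr := by
    rw [PySem.Dict.counter_eq_foldl]
    apply PySem.List.foldl_congr_mem
    exact fun d b _ => pvCountStep d b
  simp only [hA]
  set c := PySem.Dict.counter arr with hc
  have hitems : c.items = (PySem.Set.ofList arr).map (fun k => (k, (arr.count k : Int))) :=
    PySem.Dict.items_counter arr
  have hpos : ∀ p ∈ c.items, 0 < p.2 := by
    intro p hp
    rw [hitems] at hp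
    obtain ⟨k, hk, rfl⟩ := List.mem_map.mp hp
    have : k ∈ arr := (PySem.Set.mem_ofList arr k).mp hk
    have : 1 ≤ arr.count k := List.one_le_count_iff.mpr this
    simp
    omega
  rw [pvLoopA_eq c.items hpos]
  set M := pvMaxV c.items with hM
  have hitemsne : c.items ≠ [] := by
    obtain ⟨a0, t0, rfl⟩ := List.exists_cons_of_ne_nil hpre
    have ha : a0 ∈ PySem.Set.ofList (a0 :: t0) := (PySem.Set.mem_ofList _ a0).mpr (by simp)
    rw [hitems]
    exact List.ne_nil_of_mem (List.mem_map_of_mem ha)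
  have hMpos : 0 < M := pvMaxV_pos c.items hpos hitemsne
  -- the sorted copy B scans
  set s := PySem.List.sorted arr (fun x => x) false with hsdef
  have hsperm : s.Perm arr := PySem.List.sorted_perm arr (fun x => x) false
  have hspair : s.Pairwise (· ≤ ·) := PySem.List.sorted_pairwise arr (fun x => x)
  have hsne : s ≠ [] := by
    rw [hsdef, Ne, PySem.List.sorted_eq_nil_iff]
    exact hpre
  have hcnt : ∀ v : Int, s.count v = arr.count v := fun v => hsperm.count_eq v
  have hmem : ∀ v : Int, v ∈ s ↔ v ∈ arr := fun v => hsperm.mem_iff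
  -- the max multiplicity equals A's running max of the counter values
  have hMle : M ≤ pvMC s := by
    rcases PySem.List.foldl_max_mem (c.items.map (·.2)) 0 with h0 | hin
    · rw [hM, pvMaxV, h0]; exact pvMC_nonneg s
    · obtain ⟨p, hp, hp2⟩ := List.mem_map.mp hin
      rw [hitems] at hp
      obtain ⟨k, hk, rfl⟩ := List.mem_map.mp hp
      have hks : k ∈ s := (hmem k).mpr ((PySem.Set.mem_ofList arr k).mp hk)
      have := pvMC_bound s k hks
      rw [hcnt k] at this
      rw [hM, pvMaxV, ← hp2]
      exact this
  have hMge : pvMC s ≤ M := by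
    rcases PySem.List.foldl_max_mem (s.map (fun v => (s.count v : Int))) 0 with h0 | hin
    · rw [pvMC, h0]; omega
    · obtain ⟨v, hv, hv2⟩ := List.mem_map.mp hin
      have hva : v ∈ arr := (hmem v).mp hv
      have hvof : v ∈ PySem.Set.ofList arr := (PySem.Set.mem_ofList arr v).mpr hva
      have hpin : ((arr.count v : Int)) ∈ c.items.map (·.2) := by
        rw [hitems, List.map_map]
        exact List.mem_map_of_mem hvof
      have := (PySem.List.le_foldl_max (c.items.map (·.2)) 0).2 _ hpin
      rw [pvMC, ← hv2, hcnt v]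
      exact this
  have hMeq : pvMC s = M := le_antisymm hMge hMle
  -- B's scan: least value of maximal multiplicity
  have h01 : (0 : Int) < max 0 (pvMC s) := lt_of_lt_of_le hMpos (hMeq ▸ le_max_right 0 M)
  obtain ⟨m, hansm, hmmem, hmcnt, hmmin⟩ :=
    (pvFoldB_char s.length s none 0 0 none le_rfl hspair (by simp) le_rfl).2.1 h01
  have hmax0 : max (0 : Int) (pvMC s) = M := by rw [hMeq]; omega
  rw [hmax0] at hmcnt hmmin
  -- A's tie list and its minimum
  set tie := ((c.items.filter fun p => decide (p.2 = M)).map (·.1)) with htie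
  have htiemem : ∀ b : Int, b ∈ tie ↔ b ∈ arr ∧ (arr.count b : Int) = M := by
    intro b
    rw [htie, hitems]
    simp [List.mem_map, List.mem_filter, PySem.Set.mem_ofList]
  have htiene : tie ≠ [] := by
    rcases PySem.List.foldl_max_mem (c.items.map (·.2)) 0 with h0 | hin
    · exfalso; rw [hM, pvMaxV, h0] at hMpos; omega
    · obtain ⟨p, hp, hp2⟩ := List.mem_map.mp hin
      rw [hitems] at hp
      obtain ⟨k, hk, rfl⟩ := List.mem_map.mp hp
      apply List.ne_nil_of_mem (a := k)
      rw [htiemem k]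
      exact ⟨(PySem.Set.mem_ofList arr k).mp hk, by rw [hM, pvMaxV, ← hp2]⟩
  rcases hminq : PySem.List.min? tie (fun x => x) with _ | mA
  · exact absurd ((PySem.List.min?_eq_none_iff tie (fun x => x)).mp hminq) htiene
  · have hmAmem := PySem.List.min?_mem hminq
    have hmAmin := PySem.List.min?_isMin hminq
    rw [hansm]
    simp only [Option.getD_some]
    -- the two minima coincide
    have h1 : m ≤ mA := by
      obtain ⟨hmAarr, hmAcnt⟩ := (htiemem mA).mp hmAmem
      apply hmmin mA ((hmem mA).mpr hmAarr)
      rw [hcnt mA]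
      exact hmAcnt
    have h2 : mA ≤ m := by
      have hmtie : m ∈ tie := by
        rw [htiemem m]
        refine ⟨(hmem m).mp hmmem, ?_⟩
        rw [← hcnt m]
        exact hmcnt
      exact hmAmin m hmtie
    omega
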